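-- pv_equiv track=rewrite | github.com/Lanaaa22/trabalho-de-Prog-2 | trabalho-fernando-ilanna.py | criarLista
-- ===== SOURCE A (Python) =====
-- def idade(data):
--     data_ref = (24,6,2025)
--     dia_r,mes_r,ano_r = data_ref
--     dia,mes,ano = data
--     idade = ano_r - ano
--     if mes > mes_r:
--         idade -= 1
--     elif mes == mes_r:
--         if dia > dia_r:
--             idade -= 1
--     return idade
--
-- def categoria(data):
--     idade_atual = idade(data)
--     if idade_atual < 20:
--         return 0
--     elif idade_atual <= 39:
--         return 1
--     else:
--         return 2
--
-- def criarLista(d):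
--     cat0 = 0
--     cat1 = 0
--     l = []
--     for chave in d:
--         if categoria(d[chave][1]) == 0:
--             cat0 += 1
--             l.append(chave)
--     for chave in d:
--         if categoria(d[chave][1]) == 1:
--             cat1 += 1
--             l.append(chave)
--     for chave in d:
--         if categoria(d[chave][1]) == 2:
--             l.append(chave)
--     return l,cat0,cat1
-- ===== SOURCE B (Python) =====
-- def idade(data):
--     data_ref = (24,6,2025)
--     dia_r,mes_r,ano_r = data_ref
--     dia,mes,ano = data
--     idade = ano_r - ano
--     if mes > mes_r:
--         idade -= 1
--     elif mes == mes_r: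
--         if dia > dia_r:
--             idade -= 1
--     return idade
--
-- def categoria(data):
--     idade_atual = idade(data)
--     if idade_atual < 20:
--         return 0
--     elif idade_atual <= 39:
--         return 1
--     else:
--         return 2
--
-- def criarLista(d):
--     b0, b1, b2 = [], [], []
--     for chave, val in d.items():
--         (b0, b1, b2)[categoria(val[1])].append(chave)
--     return b0 + b1 + b2, len(b0), len(b1)
-- ===== Notes on version B (the rewrite author's own statement) =====
-- stated objective: alternative
-- what changed: One pass over the dict items partitioning keys into three buckets (categoria computed once per key), then concatenating buckets and taking their lengths, instead of A's three full scans each recomputing categoria and filtering for one category.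
import Mathlib
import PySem

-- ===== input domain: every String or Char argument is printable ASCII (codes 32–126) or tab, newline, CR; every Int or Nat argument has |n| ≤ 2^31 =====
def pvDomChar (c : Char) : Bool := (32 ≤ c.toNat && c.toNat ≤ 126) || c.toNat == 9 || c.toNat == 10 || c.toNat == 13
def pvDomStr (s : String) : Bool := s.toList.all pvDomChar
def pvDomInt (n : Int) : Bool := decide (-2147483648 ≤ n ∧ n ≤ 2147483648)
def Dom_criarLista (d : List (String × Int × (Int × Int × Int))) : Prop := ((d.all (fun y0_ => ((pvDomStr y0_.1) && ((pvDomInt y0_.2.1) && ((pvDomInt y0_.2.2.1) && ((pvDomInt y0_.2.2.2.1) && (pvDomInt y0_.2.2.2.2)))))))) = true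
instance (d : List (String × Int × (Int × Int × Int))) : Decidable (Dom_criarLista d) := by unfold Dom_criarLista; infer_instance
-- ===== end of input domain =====

-- ===== PORT A =====
-- B groups keys into three buckets in one pass instead of A's three full scans; return values proved equal.

def idade (data : Int × Int × Int) : Int :=
  let dia_r : Int := 24
  let mes_r : Int := 6
  let ano_r : Int := 2025
  let i0 := ano_r - data.2.2
  if data.2.1 > mes_r then i0 - 1
  else if data.2.1 = mes_r then (if data.1 > dia_r then i0 - 1 else i0)
  else i0

def categoria (data : Int × Int × Int) : Int :=
  if idade data < 20 then 0
  else if idade data ≤ 39 then 1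
  else 2

def criarLista (d : List (String × Int × (Int × Int × Int))) : List String × Int × Int :=
  let look := fun (k : String) => (PySem.Dict.mk d).getD k (0, (0, 0, 0))
  let s1 := d.foldl (fun (acc : Int × List String) kv =>
    if categoria (look kv.1).2 = 0 then (acc.1 + 1, acc.2 ++ [kv.1]) else acc) (0, [])
  let s2 := d.foldl (fun (acc : Int × List String) kv =>
    if categoria (look kv.1).2 = 1 then (acc.1 + 1, acc.2 ++ [kv.1]) else acc) (0, s1.2)
  let l3 := d.foldl (fun (acc : List String) kv =>
    if categoria (look kv.1).2 = 2 then acc ++ [kv.1] else acc) s2.2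
  (l3, s1.1, s2.1)

-- ===== PORT B =====
def criarLista_alt (d : List (String × Int × (Int × Int × Int))) : List String × Int × Int :=
  let bs := d.foldl (fun (b : List String × List String × List String) kv =>
    if categoria kv.2.2 = 0 then (b.1 ++ [kv.1], b.2.1, b.2.2)
    else if categoria kv.2.2 = 1 then (b.1, b.2.1 ++ [kv.1], b.2.2)
    else (b.1, b.2.1, b.2.2 ++ [kv.1])) ([], [], [])
  (bs.1 ++ bs.2.1 ++ bs.2.2, (bs.1.length : Int), (bs.2.1.length : Int))

-- ===== PRECONDITION & SPEC =====
-- Pre_ excludes association lists with duplicate keys: those do not represent a unique Python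
-- dict (Python collapses them, keeping the last value), so the assoc-list reading is ambiguous;
-- on the collapsed dict both Python programs return the same value.
def Pre_criarLista (d : List (String × Int × (Int × Int × Int))) : Prop :=
  (d.map Prod.fst).Nodup

instance (d : List (String × Int × (Int × Int × Int))) : Decidable (Pre_criarLista d) := by
  unfold Pre_criarLista; infer_instance

def pvWitness_criarLista : (List (String × Int × (Int × Int × Int))) :=
  [("x", 0, (1, 1, 2010)), ("y", 0, (1, 1, 1990)), ("z", 0, (1, 1, 1950))]

def Spec_criarLista (d : List (String × Int × (Int × Int × Int))) (out : List String × Int × Int) : Prop := out = criarLista_alt d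
instance (d : List (String × Int × (Int × Int × Int))) (out : List String × Int × Int) : Decidable (Spec_criarLista d out) := by unfold Spec_criarLista; infer_instance

-- ===== CLAIM (what is proved, stated in full; the proofs are below) =====
def Claim_equal_criarLista : Prop := ∀ (d : List (String × Int × (Int × Int × Int))), Dom_criarLista d → Pre_criarLista d → Spec_criarLista d (criarLista d)

-- ===== LEMMAS AND PROOFS =====

-- categoria takes only the values 0, 1, 2
theorem categoria_cases (x : Int × Int × Int) :
    categoria x = 0 ∨ categoria x = 1 ∨ categoria x = 2 := by
  unfold categoria; split_ifs <;> simp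

-- with Nodup keys, the dict lookup at the key of a stored pair returns that pair's value
theorem look_eq (d : List (String × Int × (Int × Int × Int)))
    (hnd : (d.map Prod.fst).Nodup) (kv : String × Int × (Int × Int × Int)) (h : kv ∈ d) :
    (PySem.Dict.mk d).getD kv.1 (0, (0, 0, 0)) = kv.2 := by
  have hn : (PySem.Dict.mk d).keys.Nodup := by
    simpa [PySem.Dict.keys_mk] using hnd
  exact PySem.Dict.getD_of_mem_items (d := PySem.Dict.mk d) (k := kv.1) (v := kv.2)
    (by simpa using h) hn _

-- A's count-and-append loop, characterised with a general initial state
theorem cfold_eq (p : (String × Int × (Int × Int × Int)) → Prop) [DecidablePred p]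
    (d : List (String × Int × (Int × Int × Int))) (a : Int) (l : List String) :
    d.foldl (fun (acc : Int × List String) kv =>
      if p kv then (acc.1 + 1, acc.2 ++ [kv.1]) else acc) (a, l)
    = (a + ((d.countP (fun kv => decide (p kv)) : Nat) : Int),
       l ++ (d.filter (fun kv => decide (p kv))).map Prod.fst) := by
  induction d generalizing a l with
  | nil => simp
  | cons kv rest ih =>
    by_cases h : p kv <;>
      simp [List.foldl_cons, h, ih] <;> omega

-- B's bucket loop, characterised with a general initial state
theorem bfold_eq (d : List (String × Int × (Int × Int × Int)))
    (b0 b1 b2 : List String) :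
    d.foldl (fun (b : List String × List String × List String) kv =>
      if categoria kv.2.2 = 0 then (b.1 ++ [kv.1], b.2.1, b.2.2)
      else if categoria kv.2.2 = 1 then (b.1, b.2.1 ++ [kv.1], b.2.2)
      else (b.1, b.2.1, b.2.2 ++ [kv.1])) (b0, b1, b2)
    = (b0 ++ (d.filter (fun kv => decide (categoria kv.2.2 = 0))).map Prod.fst,
       b1 ++ (d.filter (fun kv => decide (categoria kv.2.2 = 1))).map Prod.fst,
       b2 ++ (d.filter (fun kv => decide (categoria kv.2.2 = 2))).map Prod.fst) := by
  induction d generalizing b0 b1 b2 with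
  | nil => simp
  | cons kv rest ih =>
    rcases categoria_cases kv.2.2 with h | h | h <;>
      simp [List.foldl_cons, h, ih]

theorem criarLista_eq (d : List (String × Int × (Int × Int × Int)))
    (hnd : (d.map Prod.fst).Nodup) : criarLista d = criarLista_alt d := by
  have h1 : d.foldl (fun (acc : Int × List String) kv =>
      if categoria ((PySem.Dict.mk d).getD kv.1 (0, (0, 0, 0))).2 = 0 then (acc.1 + 1, acc.2 ++ [kv.1]) else acc) (0, []) =
      d.foldl (fun (acc : Int × List String) kv =>
      if categoria kv.2.2 = 0 then (acc.1 + 1, acc.2 ++ [kv.1]) else acc) (0, []) := by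
    apply PySem.List.foldl_congr_mem; intro acc kv hm; rw [look_eq d hnd kv hm]
  have h2 : ∀ init : Int × List String, d.foldl (fun (acc : Int × List String) kv =>
      if categoria ((PySem.Dict.mk d).getD kv.1 (0, (0, 0, 0))).2 = 1 then (acc.1 + 1, acc.2 ++ [kv.1]) else acc) init =
      d.foldl (fun (acc : Int × List String) kv =>
      if categoria kv.2.2 = 1 then (acc.1 + 1, acc.2 ++ [kv.1]) else acc) init := by
    intro init; apply PySem.List.foldl_congr_mem; intro acc kv hm; rw [look_eq d hnd kv hm]
  have h3 : ∀ init : List String, d.foldl (fun (acc : List String) kv =>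
      if categoria ((PySem.Dict.mk d).getD kv.1 (0, (0, 0, 0))).2 = 2 then acc ++ [kv.1] else acc) init =
      d.foldl (fun (acc : List String) kv =>
      if categoria kv.2.2 = 2 then acc ++ [kv.1] else acc) init := by
    intro init; apply PySem.List.foldl_congr_mem; intro acc kv hm; rw [look_eq d hnd kv hm]
  simp only [criarLista, criarLista_alt]
  rw [bfold_eq, h1, h2, h3, cfold_eq, cfold_eq]
  simp only [PySem.List.foldl_append_ite]
  simp [List.countP_eq_length_filter, List.append_assoc]

-- ===== VERDICT (by name: the statement is the Claim_ definition above) =====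
theorem criarLista_spec : Claim_equal_criarLista := by
  intro d _ hpre
  exact criarLista_eq d hpre
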